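-- pv_equiv track=rewrite | github.com/84zume/AtCoder | contests/src/agc040/agc040_a/main.py | solve
-- ===== SOURCE A (Python) =====
-- def solve(S):
--     a = [0]*(len(S)+1)
--
--     for i in range(len(S)):
--         if S[i] == '<':
--             a[i+1] = max(a[i+1], a[i]+1)
--
--     for i in reversed(range(len(S))):
--         if S[i] == '>':
--             a[i] = max(a[i], a[i+1]+1)
--
--     return sum(a)
-- ===== SOURCE B (Python) =====
-- def _flush(cur, k, total, prev_lt):
--     # settle a finished run of k copies of cur; prev_lt = length of the
--     # immediately preceding '<' run (0 if none)
--     if cur == '<':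
--         return total + k * (k + 1) // 2, k
--     if cur == '>':
--         return total + k * (k + 1) // 2 - min(prev_lt, k), 0
--     return total, 0
--
--
-- def solve(S):
--     # one pass over maximal runs: a '<' run of length p contributes 1+..+p,
--     # a '>' run of length q contributes 1+..+q minus min(p, q) for the shared
--     # peak with a directly preceding '<' run of length p
--     total = 0
--     prev_lt = 0
--     cur = None
--     k = 0
--     for c in S:
--         if c == cur:
--             k += 1
--         else:
--             total, prev_lt = _flush(cur, k, total, prev_lt)
--             cur, k = c, 1
--     total, prev_lt = _flush(cur, k, total, prev_lt)
--     return total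
-- ===== Notes on version B (the rewrite author's own statement) =====
-- stated objective: alternative
-- what changed: Replaces A's two array sweeps (forward max-propagation for '<', backward for '>') by a single pass over maximal character runs that adds each run's triangular-number contribution in closed form, counting a '<'/'>' peak once via min(p,q).
import Mathlib
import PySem

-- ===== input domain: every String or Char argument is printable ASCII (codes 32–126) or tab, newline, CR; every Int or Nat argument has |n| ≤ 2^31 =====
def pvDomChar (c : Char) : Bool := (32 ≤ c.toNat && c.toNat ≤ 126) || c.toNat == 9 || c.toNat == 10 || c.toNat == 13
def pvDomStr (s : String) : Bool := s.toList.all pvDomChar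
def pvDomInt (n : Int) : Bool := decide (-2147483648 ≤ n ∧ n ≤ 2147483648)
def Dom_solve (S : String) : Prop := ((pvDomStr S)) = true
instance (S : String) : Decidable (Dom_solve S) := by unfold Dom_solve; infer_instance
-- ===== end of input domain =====

-- B replaces A's two array sweeps by a single pass over maximal character runs with closed-form run sums (alternative decomposition, same O(n) cost).

-- ===== PORT A =====
-- body of A's first loop: 'if S[i] == "<": a[i+1] = max(a[i+1], a[i]+1)'
def fstepA (cs : List Char) (a : List Int) (i : Nat) : List Int :=
  if cs.getD i ' ' = '<' then a.set (i + 1) (max (a.getD (i + 1) 0) (a.getD i 0 + 1)) else a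

-- body of A's second loop: 'if S[i] == ">": a[i] = max(a[i], a[i+1]+1)'
def bstepA (cs : List Char) (a : List Int) (i : Nat) : List Int :=
  if cs.getD i ' ' = '>' then a.set i (max (a.getD i 0) (a.getD (i + 1) 0 + 1)) else a

-- literal port of A: array of n+1 zeros, forward '<' sweep, backward '>' sweep, sum
def solve (S : String) : Int :=
  let cs := S.toList
  let n := cs.length
  let a : List Int := List.replicate (n + 1) 0
  let a := (List.range n).foldl (fstepA cs) a
  let a := (List.range n).reverse.foldl (bstepA cs) a
  a.sum

-- ===== PORT B =====
-- port of Source B's _flush: settle a finished run of k copies of cur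
def flushB (cur : Option Char) (k total prev_lt : Int) : Int × Int :=
  if cur = some '<' then (total + PySem.Int.floordiv (k * (k + 1)) 2, k)
  else if cur = some '>' then (total + PySem.Int.floordiv (k * (k + 1)) 2 - min prev_lt k, 0)
  else (total, 0)

-- one step of Source B's loop body; state (total, prev_lt, cur, k)
def stepB (st : Int × Int × Option Char × Int) (c : Char) : Int × Int × Option Char × Int :=
  if some c = st.2.2.1 then (st.1, st.2.1, st.2.2.1, st.2.2.2 + 1)
  else
    let tp := flushB st.2.2.1 st.2.2.2 st.1 st.2.1
    (tp.1, tp.2, some c, 1)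

def solve_alt (S : String) : Int :=
  let st := S.toList.foldl stepB (0, 0, none, 0)
  (flushB st.2.2.1 st.2.2.2 st.1 st.2.1).1

-- ===== PRECONDITION & SPEC =====
def Spec_solve (S : String) (out : Int) : Prop := out = solve_alt S
instance (S : String) (out : Int) : Decidable (Spec_solve S out) := by unfold Spec_solve; infer_instance

-- ===== CLAIM (what is proved, stated in full; the proofs are below) =====
def Claim_equal_solve : Prop := ∀ (S : String), Dom_solve S → Spec_solve S (solve S)

-- ===== LEMMAS AND PROOFS =====

-- length of the leading run of '>'
def rlen : List Char → Int
  | [] => 0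
  | c :: rest => if c = '>' then rlen rest + 1 else 0

-- values max(L_i, R_i) at positions i..n, where l0 is the '<'-height entering
def mvals (l0 : Int) : List Char → List Int
  | [] => [max l0 0]
  | c :: rest => max l0 (rlen (c :: rest)) :: mvals (if c = '<' then l0 + 1 else 0) rest

def mtail (l0 : Int) : List Char → List Int
  | [] => []
  | c :: rest => mvals (if c = '<' then l0 + 1 else 0) rest

-- '<'-heights at positions 0..m-1 (ptab) and the final height (lfin)
def ptab (l0 : Int) : List Char → List Int
  | [] => []
  | c :: rest => l0 :: ptab (if c = '<' then l0 + 1 else 0) rest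

def lfin (l0 : Int) : List Char → Int
  | [] => l0
  | c :: rest => lfin (if c = '<' then l0 + 1 else 0) rest

def ltab (l0 : Int) : List Char → List Int
  | [] => [l0]
  | c :: rest => l0 :: ltab (if c = '<' then l0 + 1 else 0) rest

-- maximal runs of equal characters
def runsOf : List Char → List (Char × Nat)
  | [] => []
  | c :: rest => (c, (rest.takeWhile (· = c)).length + 1) :: runsOf (rest.dropWhile (· = c))
termination_by cs => cs.length
decreasing_by
  simpa using Nat.lt_succ_of_le (List.length_dropWhile_le _ _)

def flat : List (Char × Nat) → List Char
  | [] => []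
  | (c, k) :: rs => List.replicate k c ++ flat rs

def tri : Nat → Int
  | 0 => 0
  | n + 1 => tri n + (n + 1)

def triFrom (l0 : Int) : Nat → Int
  | 0 => 0
  | k + 1 => l0 + triFrom (l0 + 1) k

-- Source B's run formula as a fold over the run list
def runB (t p : Int) : List (Char × Nat) → Int
  | [] => t
  | (c, k) :: rs =>
    if c = '<' then runB (t + tri k) (k : Int) rs
    else if c = '>' then runB (t + tri k - min p k) 0 rs
    else runB t 0 rs

-- well-formed run list: positive lengths, adjacent runs distinct, first ≠ prev
def wfR : Option Char → List (Char × Nat) → Prop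
  | _, [] => True
  | prev, (c, k) :: rs => 1 ≤ k ∧ some c ≠ prev ∧ wfR (some c) rs

def finB (st : Int × Int × Option Char × Int) : Int :=
  (flushB st.2.2.1 st.2.2.2 st.1 st.2.1).1

-- ---- generic list helpers ----
theorem chr_ll : ('<' = '<') = True := eq_true rfl
theorem chr_gg : ('>' = '>') = True := eq_true rfl
theorem chr_gl : ('>' = '<') = False := eq_false (by decide)

theorem getD_append_len {α : Type} (xs : List α) (y : α) (ys : List α) (d : α) :
    (xs ++ y :: ys).getD xs.length d = y := by
  induction xs with
  | nil => simp
  | cons x xs ih => simpa using ih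

theorem getD_append_len' {α : Type} (xs : List α) (y : α) (ys : List α) (d : α) (i : Nat)
    (hi : i = xs.length) : (xs ++ y :: ys).getD i d = y := by
  subst hi; exact getD_append_len xs y ys d

theorem set_append_len (xs : List Int) (y : Int) (ys : List Int) (v : Int) :
    (xs ++ y :: ys).set xs.length v = xs ++ v :: ys := by
  induction xs with
  | nil => simp
  | cons x xs ih => simpa using ih

theorem set_append_len' (xs : List Int) (y : Int) (ys : List Int) (v : Int) (i : Nat)
    (hi : i = xs.length) : (xs ++ y :: ys).set i v = xs ++ v :: ys := by
  subst hi; exact set_append_len xs y ys v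

theorem getD_append_len1 {α : Type} (xs : List α) (y z : α) (ys : List α) (d : α) :
    (xs ++ y :: z :: ys).getD (xs.length + 1) d = z := by
  have h := getD_append_len (xs ++ [y]) z ys d
  simpa using h

theorem getD_append_len1' {α : Type} (xs : List α) (y z : α) (ys : List α) (d : α) (i : Nat)
    (hi : i = xs.length) : (xs ++ y :: z :: ys).getD (i + 1) d = z := by
  subst hi; exact getD_append_len1 xs y z ys d

theorem take_succ_getD {α : Type} (l : List α) (m : Nat) (d : α) (h : m < l.length) :
    l.take (m + 1) = l.take m ++ [l.getD m d] := by
  rw [List.take_add_one, List.getElem?_eq_getElem h]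
  rw [List.getD_eq_getElem l d h]
  rfl

theorem drop_getD_cons {α : Type} (l : List α) (m : Nat) (d : α) (h : m < l.length) :
    l.drop m = l.getD m d :: l.drop (m + 1) := by
  rw [List.drop_eq_getElem_cons h]
  simp [List.getD, List.getElem?_eq_getElem h]

-- ---- ptab / lfin / ltab ----
theorem ptab_length (t : List Char) : ∀ l0, (ptab l0 t).length = t.length := by
  induction t with
  | nil => intro l0; simp [ptab]
  | cons c rest ih => intro l0; simp [ptab, ih]

theorem ltab_eq (t : List Char) : ∀ l0, ltab l0 t = ptab l0 t ++ [lfin l0 t] := by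
  induction t with
  | nil => intro l0; simp [ltab, ptab, lfin]
  | cons c rest ih => intro l0; simp [ltab, ptab, lfin, ih]

theorem lfin_append_last (t : List Char) (c : Char) : ∀ l0,
    lfin l0 (t ++ [c]) = if c = '<' then lfin l0 t + 1 else 0 := by
  induction t with
  | nil => intro l0; simp [lfin]
  | cons b rest ih => intro l0; simp [lfin, ih]

theorem ptab_append_last (t : List Char) (c : Char) : ∀ l0,
    ptab l0 (t ++ [c]) = ptab l0 t ++ [lfin l0 t] := by
  induction t with
  | nil => intro l0; simp [ptab, lfin]
  | cons b rest ih => intro l0; simp [ptab, lfin, ih]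

theorem ltab_append_last (t : List Char) (c : Char) (l0 : Int) :
    ltab l0 (t ++ [c]) = ltab l0 t ++ [if c = '<' then lfin l0 t + 1 else 0] := by
  rw [ltab_eq, ltab_eq, ptab_append_last, lfin_append_last, List.append_assoc]

theorem lfin_nonneg (t : List Char) : ∀ l0, 0 ≤ l0 → 0 ≤ lfin l0 t := by
  induction t with
  | nil => intro l0 h; simpa [lfin] using h
  | cons c rest ih =>
    intro l0 h
    exact ih (if c = '<' then l0 + 1 else 0) (by split <;> omega)

theorem rlen_nonneg (u : List Char) : 0 ≤ rlen u := by
  induction u with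
  | nil => simp [rlen]
  | cons c rest ih => by_cases hc : c = '>' <;> simp [rlen, hc] <;> omega

theorem ltab_length (t : List Char) (l0 : Int) : (ltab l0 t).length = t.length + 1 := by
  rw [ltab_eq]; simp [ptab_length]

theorem ltab_getD_last (t : List Char) : ∀ (l0 : Int) (z : List Int) (d : Int),
    (ltab l0 t ++ z).getD t.length d = lfin l0 t := by
  induction t with
  | nil => intro l0 z d; simp [ltab, lfin]
  | cons c rest ih => intro l0 z d; simpa [ltab, lfin] using ih _ z d

theorem ltab_getD_last' (t : List Char) (l0 : Int) (z : List Int) (d : Int) (i : Nat)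
    (hi : i = t.length) : (ltab l0 t ++ z).getD i d = lfin l0 t := by
  subst hi; exact ltab_getD_last t l0 z d

theorem mvals_eq (l0 : Int) (u : List Char) :
    mvals l0 u = max l0 (rlen u) :: mtail l0 u := by
  cases u <;> simp [mvals, mtail, rlen]

-- ---- A's forward sweep computes the '<'-heights ----
theorem fwd_inv (cs : List Char) : ∀ m, m ≤ cs.length →
    (List.range m).foldl (fstepA cs) (List.replicate (cs.length + 1) 0) =
      ltab 0 (cs.take m) ++ List.replicate (cs.length - m) 0 := by
  intro m
  induction m with
  | zero => intro _; simp [ltab, List.replicate_succ]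
  | succ m ih =>
    intro h
    have hm : m ≤ cs.length := by omega
    have hmlt : m < cs.length := by omega
    rw [List.range_succ, List.foldl_append, ih hm]
    have ht : (cs.take m).length = m := by simp [List.length_take]; omega
    have hrep : List.replicate (cs.length - m) (0 : Int) =
        0 :: List.replicate (cs.length - (m + 1)) 0 := by
      have : cs.length - m = (cs.length - (m + 1)) + 1 := by omega
      rw [this, List.replicate_succ]
    have hgm : (ltab 0 (cs.take m) ++ List.replicate (cs.length - m) (0:Int)).getD m 0 =
        lfin 0 (cs.take m) := ltab_getD_last' _ _ _ _ _ ht.symm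
    have hlen : (ltab (0:Int) (cs.take m)).length = m + 1 := by
      rw [ltab_length, ht]
    have hgm1 : (ltab 0 (cs.take m) ++ List.replicate (cs.length - m) (0:Int)).getD (m + 1) 0 = 0 := by
      rw [hrep]
      exact getD_append_len' _ _ _ _ _ hlen.symm
    have htake := take_succ_getD cs m ' ' hmlt
    simp only [List.foldl_cons, List.foldl_nil, fstepA]
    by_cases hc : cs.getD m ' ' = '<'
    · rw [if_pos hc, hgm, hgm1, hrep]
      have hmax : max (0:Int) (lfin 0 (cs.take m) + 1) = lfin 0 (cs.take m) + 1 := by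
        have := lfin_nonneg (cs.take m) 0 le_rfl; omega
      rw [hmax]
      rw [set_append_len' _ _ _ _ _ hlen.symm]
      rw [htake, ltab_append_last, if_pos hc]
      simp
    · rw [if_neg hc, hrep, htake, ltab_append_last, if_neg hc]
      simp

-- ---- A's backward sweep turns heights into max(L_i, R_i) ----
theorem bwd_inv (cs : List Char) : ∀ m, m ≤ cs.length →
    ((List.range m).reverse).foldl (bstepA cs)
      (ptab 0 (cs.take m) ++ mvals (lfin 0 (cs.take m)) (cs.drop m)) = mvals 0 cs := by
  intro m
  induction m with
  | zero => simp [ptab, lfin]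
  | succ m ih =>
    intro h
    have hm : m ≤ cs.length := by omega
    have hmlt : m < cs.length := by omega
    have ht : (cs.take m).length = m := by simp [List.length_take]; omega
    have hrev : (List.range (m + 1)).reverse = m :: (List.range m).reverse := by
      rw [List.range_succ]; simp
    rw [hrev, List.foldl_cons]
    have hstep : bstepA cs (ptab 0 (cs.take (m+1)) ++ mvals (lfin 0 (cs.take (m+1))) (cs.drop (m+1))) m
        = ptab 0 (cs.take m) ++ mvals (lfin 0 (cs.take m)) (cs.drop m) := by
      set c := cs.getD m ' ' with hc
      set L := lfin 0 (cs.take m) with hL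
      set u' := cs.drop (m + 1) with hu'
      have htake := take_succ_getD cs m ' ' hmlt
      have hdrop := drop_getD_cons cs m ' ' hmlt
      have hps : ptab 0 (cs.take (m+1)) = ptab 0 (cs.take m) ++ [L] := by
        rw [htake, ptab_append_last]
      have hls : lfin 0 (cs.take (m+1)) = if c = '<' then L + 1 else 0 := by
        rw [htake, lfin_append_last]
      have hplen : (ptab (0:Int) (cs.take m)).length = m := by rw [ptab_length, ht]
      have hLnn : 0 ≤ L := lfin_nonneg _ 0 le_rfl
      have hrnn : 0 ≤ rlen u' := rlen_nonneg u'
      rw [hps, hls, mvals_eq]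
      simp only [List.append_assoc, List.cons_append, List.nil_append]
      by_cases hgt : c = '>'
      · have hne : ¬ ('>' = '<') := by decide
        rw [hgt, if_neg hne]
        simp only [bstepA, ← hc, hgt, chr_gg, if_true]
        have hg0 : (ptab 0 (cs.take m) ++ L :: max 0 (rlen u') :: mtail 0 u').getD m 0 = L :=
          getD_append_len' _ _ _ _ _ hplen.symm
        have hg1 : (ptab 0 (cs.take m) ++ L :: max 0 (rlen u') :: mtail 0 u').getD (m+1) 0
            = max 0 (rlen u') := getD_append_len1' _ _ _ _ _ _ hplen.symm
        rw [hg0, hg1]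
        rw [set_append_len' _ _ _ _ _ hplen.symm]
        rw [hdrop, ← hc, hgt]
        rw [show mvals L ('>' :: u') = max L (rlen ('>' :: u')) :: mvals (if '>' = '<' then L + 1 else 0) u' from rfl]
        rw [mvals_eq]
        have h1 : max L (max 0 (rlen u') + 1) = max L (rlen ('>' :: u')) := by
          simp only [rlen, chr_gg, if_true]; omega
        rw [h1]
        simp
      · simp only [bstepA, ← hc, if_neg hgt]
        rw [hdrop, ← hc]
        rw [show mvals L (c :: u') = max L (rlen (c :: u')) :: mvals (if c = '<' then L + 1 else 0) u' from rfl]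
        rw [mvals_eq]
        have h1 : max L (rlen (c :: u')) = L := by
          simp only [rlen, if_neg hgt]; omega
        rw [h1]
    rw [show cs.take (m+1) = cs.take (m+1) from rfl] at hstep
    rw [hstep]
    exact ih hm

theorem solve_eq_mvals (S : String) : solve S = (mvals 0 S.toList).sum := by
  show ((List.range S.toList.length).reverse.foldl (bstepA S.toList)
      ((List.range S.toList.length).foldl (fstepA S.toList)
        (List.replicate (S.toList.length + 1) 0))).sum = _
  rw [fwd_inv S.toList S.toList.length le_rfl]
  have h0 : ltab 0 (S.toList.take S.toList.length) ++ List.replicate (S.toList.length - S.toList.length) (0:Int)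
      = ptab 0 (S.toList.take S.toList.length) ++ mvals (lfin 0 (S.toList.take S.toList.length)) (S.toList.drop S.toList.length) := by
    simp only [List.take_length, List.drop_length, Nat.sub_self, List.replicate_zero,
      List.append_nil]
    rw [ltab_eq]
    have : mvals (lfin 0 S.toList) [] = [lfin 0 S.toList] := by
      have := lfin_nonneg S.toList 0 le_rfl
      simp [mvals]; omega
    rw [this]
  rw [h0, bwd_inv S.toList S.toList.length le_rfl]

-- ---- runs: flattening and well-formedness ----
theorem takeWhile_eq_replicate (c : Char) (l : List Char) :
    l.takeWhile (· = c) = List.replicate (l.takeWhile (· = c)).length c := by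
  rw [List.eq_replicate_iff]
  refine ⟨rfl, fun b hb => ?_⟩
  have := List.mem_takeWhile_imp hb
  simpa using this

theorem flat_runsOf (cs : List Char) : flat (runsOf cs) = cs := by
  induction cs using runsOf.induct with
  | case1 => simp [runsOf, flat]
  | case2 c rest ih =>
    rw [runsOf]
    simp only [flat, List.replicate_succ]
    rw [← takeWhile_eq_replicate, ih]
    simp [List.takeWhile_append_dropWhile]

theorem dropWhile_head_not {α : Type} (p : α → Bool) (l : List α) (d : α)
    (h : (l.dropWhile p).head? = some d) : p d = false := by
  induction l with
  | nil => simp [List.dropWhile] at h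
  | cons a l ih =>
    rw [List.dropWhile_cons] at h
    by_cases hp : p a
    · rw [if_pos hp] at h; exact ih h
    · rw [if_neg hp] at h
      simp at h
      rw [← h]
      simpa using hp

theorem wf_runsOf (cs : List Char) : ∀ prev : Option Char,
    (∀ d, cs.head? = some d → some d ≠ prev) → wfR prev (runsOf cs) := by
  induction cs using runsOf.induct with
  | case1 => intro prev _; simp [runsOf, wfR]
  | case2 c rest ih =>
    intro prev hprev
    rw [runsOf]
    refine ⟨by omega, hprev c rfl, ?_⟩
    apply ih
    intro d hd hdc
    have hfalse := dropWhile_head_not _ _ _ hd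
    simp at hfalse hdc
    exact hfalse hdc

theorem flat_head_ne (rs : List (Char × Nat)) (c : Char) (h : wfR (some c) rs) :
    ∀ d, (flat rs).head? = some d → d ≠ c := by
  cases rs with
  | nil => intro d hd; simp [flat] at hd
  | cons ck rs =>
    obtain ⟨c', k'⟩ := ck
    obtain ⟨hk, hne, _⟩ := h
    intro d hd
    obtain ⟨j, rfl⟩ : ∃ j, k' = j + 1 := ⟨k' - 1, by omega⟩
    simp [flat, List.replicate_succ] at hd
    subst hd
    simpa using hne

-- ---- run sums on the A side ----
theorem triFrom_succ (k : Nat) : ∀ l0 : Int, triFrom l0 (k + 1) = triFrom l0 k + (l0 + k) := by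
  induction k with
  | zero => intro l0; simp [triFrom]
  | succ k ih =>
    intro l0
    rw [show triFrom l0 (k + 1 + 1) = l0 + triFrom (l0 + 1) (k + 1) from rfl, ih]
    rw [show triFrom l0 (k + 1) = l0 + triFrom (l0 + 1) k from rfl]
    push_cast; ring

theorem triFrom_zero_add (k : Nat) : triFrom 0 k + k = tri k := by
  induction k with
  | zero => simp [triFrom, tri]
  | succ k ih =>
    rw [triFrom_succ, tri]
    push_cast at *
    omega

theorem lt_run (k : Nat) : ∀ (l0 : Int) (u : List Char), 0 ≤ l0 →
    (mvals l0 (List.replicate k '<' ++ u)).sum = triFrom l0 k + (mvals (l0 + k) u).sum := by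
  induction k with
  | zero => intro l0 u _; simp [triFrom]
  | succ k ih =>
    intro l0 u hl0
    rw [List.replicate_succ, List.cons_append]
    rw [show mvals l0 ('<' :: (List.replicate k '<' ++ u)) =
      max l0 (rlen ('<' :: (List.replicate k '<' ++ u))) ::
        mvals (if '<' = '<' then l0 + 1 else 0) (List.replicate k '<' ++ u) from rfl]
    simp only [chr_ll, chr_gl, if_true, if_false, List.sum_cons]
    rw [ih (l0 + 1) u (by omega)]
    have hr : rlen ('<' :: (List.replicate k '<' ++ u)) = 0 := by simp [rlen]
    rw [hr]
    rw [show triFrom l0 (k + 1) = l0 + triFrom (l0 + 1) k from rfl]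
    have : l0 + 1 + (k : Int) = l0 + ((k : Nat) + 1 : Nat) := by push_cast; ring
    rw [this]
    omega

theorem rlen_repl_gt (k : Nat) (u : List Char)
    (h : ∀ d, u.head? = some d → d ≠ '>') :
    rlen (List.replicate k '>' ++ u) = k := by
  induction k with
  | zero =>
    simp only [List.replicate_zero, List.nil_append, Nat.cast_zero]
    cases u with
    | nil => simp [rlen]
    | cons c rest =>
      have := h c rfl
      simp [rlen, this]
  | succ k ih =>
    rw [List.replicate_succ, List.cons_append]
    simp only [rlen, if_pos rfl, ih]
    push_cast; ring

theorem gt_run (k : Nat) (u : List Char) (h : ∀ d, u.head? = some d → d ≠ '>') :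
    (mvals 0 (List.replicate k '>' ++ u)).sum = tri k + (mvals 0 u).sum := by
  induction k with
  | zero => simp [tri]
  | succ k ih =>
    rw [List.replicate_succ, List.cons_append]
    rw [show mvals 0 ('>' :: (List.replicate k '>' ++ u)) =
      max 0 (rlen ('>' :: (List.replicate k '>' ++ u))) ::
        mvals (if '>' = '<' then (0:Int) + 1 else 0) (List.replicate k '>' ++ u) from rfl]
    have hne : ¬ ('>' = '<') := by decide
    simp only [if_neg hne, List.sum_cons]
    rw [ih]
    have hr : rlen ('>' :: (List.replicate k '>' ++ u)) = (k : Int) + 1 := by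
      have h1 : rlen (List.replicate k '>' ++ u) = k := rlen_repl_gt k u h
      simp [rlen, h1]
    rw [hr, tri]
    push_cast
    omega

theorem other_run (k : Nat) (c : Char) (u : List Char) (h1 : c ≠ '<') (h2 : c ≠ '>') :
    (mvals 0 (List.replicate k c ++ u)).sum = (mvals 0 u).sum := by
  induction k with
  | zero => simp
  | succ k ih =>
    rw [List.replicate_succ, List.cons_append]
    rw [show mvals 0 (c :: (List.replicate k c ++ u)) =
      max 0 (rlen (c :: (List.replicate k c ++ u))) ::
        mvals (if c = '<' then (0:Int) + 1 else 0) (List.replicate k c ++ u) from rfl]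
    simp only [if_neg h1, List.sum_cons]
    rw [ih]
    have hr : rlen (c :: (List.replicate k c ++ u)) = 0 := by simp [rlen, h2]
    rw [hr]
    simp

theorem runB_add (rs : List (Char × Nat)) : ∀ t p : Int, runB t p rs = t + runB 0 p rs := by
  induction rs with
  | nil => intro t p; simp [runB]
  | cons ck rs ih =>
    obtain ⟨c, k⟩ := ck
    intro t p
    by_cases h1 : c = '<'
    · simp only [runB, if_pos h1]
      rw [ih (t + tri k), ih (0 + tri k)]
      try ring
    · by_cases h2 : c = '>'
      · simp only [runB, if_neg h1, if_pos h2]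
        rw [ih (t + tri k - min p k), ih (0 + tri k - min p k)]
        try ring
      · simp only [runB, if_neg h1, if_neg h2]
        rw [ih t, ih 0]
        try ring

theorem key (rs : List (Char × Nat)) : ∀ (prev : Option Char) (p : Int),
    wfR prev rs → 0 ≤ p → (0 < p → prev = some '<') →
    (mvals p (flat rs)).sum = runB p p rs := by
  induction rs with
  | nil =>
    intro prev p _ hp _
    simp [flat, mvals, runB]
    omega
  | cons ck rs ih =>
    obtain ⟨c, k⟩ := ck
    intro prev p hwf hp hplt
    obtain ⟨hk, hne, hwf'⟩ := hwf
    have hhead : ∀ d, (flat rs).head? = some d → d ≠ c := flat_head_ne rs c hwf'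
    rw [show flat ((c, k) :: rs) = List.replicate k c ++ flat rs from rfl]
    by_cases h1 : c = '<'
    · subst h1
      have hp0 : p = 0 := by
        by_contra hne0
        have : 0 < p := by omega
        exact hne (hplt this).symm
      subst hp0
      rw [lt_run k 0 (flat rs) le_rfl]
      have hIH := ih (some '<') (k : Int) hwf' (by positivity) (fun _ => rfl)
      rw [show (0:Int) + (k:Int) = (k:Int) by ring, hIH]
      simp only [runB, chr_ll, chr_gl, chr_gg, if_true, if_false]
      rw [runB_add rs ((k:Int)) ((k:Int)), runB_add rs (0 + tri k) ((k:Int))]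
      have := triFrom_zero_add k
      omega
    · by_cases h2 : c = '>'
      · subst h2
        obtain ⟨j, rfl⟩ : ∃ j, k = j + 1 := ⟨k - 1, by omega⟩
        rw [List.replicate_succ, List.cons_append]
        rw [show mvals p ('>' :: (List.replicate j '>' ++ flat rs)) =
          max p (rlen ('>' :: (List.replicate j '>' ++ flat rs))) ::
            mvals (if '>' = '<' then p + 1 else 0) (List.replicate j '>' ++ flat rs) from rfl]
        have hne2 : ¬ ('>' = '<') := by decide
        simp only [chr_ll, chr_gl, if_true, if_false, List.sum_cons]
        rw [gt_run j (flat rs) hhead]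
        have hIH := ih (some '>') 0 hwf' le_rfl (by omega)
        rw [hIH]
        have hr : rlen ('>' :: (List.replicate j '>' ++ flat rs)) = (j : Int) + 1 := by
          have := rlen_repl_gt j (flat rs) hhead
          simp [rlen, this]
        rw [hr]
        simp only [runB, chr_ll, chr_gl, chr_gg, if_true, if_false]
        rw [runB_add rs (p + tri (j + 1) - min p ((j:Nat) + 1 : Nat)) 0]
        have htri : tri (j + 1) = tri j + ((j : Int) + 1) := by simp [tri]
        have hcast : (((j:Nat) + 1 : Nat) : Int) = (j : Int) + 1 := by push_cast; ring
        rw [hcast]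
        omega
      · obtain ⟨j, rfl⟩ : ∃ j, k = j + 1 := ⟨k - 1, by omega⟩
        rw [List.replicate_succ, List.cons_append]
        rw [show mvals p (c :: (List.replicate j c ++ flat rs)) =
          max p (rlen (c :: (List.replicate j c ++ flat rs))) ::
            mvals (if c = '<' then p + 1 else 0) (List.replicate j c ++ flat rs) from rfl]
        simp only [if_neg h1, List.sum_cons]
        rw [other_run j c (flat rs) h1 h2]
        have hIH := ih (some c) 0 hwf' le_rfl (by omega)
        rw [hIH]
        have hr : rlen (c :: (List.replicate j c ++ flat rs)) = 0 := by simp [rlen, h2]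
        rw [hr]
        simp only [runB, if_neg h1, if_neg h2]
        rw [runB_add rs p 0]
        omega

-- ---- B's state machine computes the run fold ----
theorem tri_flush (k : Nat) : PySem.Int.floordiv ((k:Int) * ((k:Int) + 1)) 2 = tri k := by
  have h2 : (k:Int) * ((k:Int) + 1) = 2 * tri k := by
    induction k with
    | zero => simp [tri]
    | succ k ih =>
      have : ((k:Nat) + 1 : Nat) = k + 1 := rfl
      push_cast
      rw [show ((k:Int) + 1) * ((k:Int) + 1 + 1) = (k:Int) * ((k:Int) + 1) + 2 * ((k:Int) + 1) by ring, ih]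
      simp [tri]; push_cast; ring
  rw [h2, PySem.Int.floordiv_eq_ediv_of_pos (by norm_num)]
  exact Int.mul_ediv_cancel_left _ (by norm_num)

theorem repl_fold (k : Nat) (c : Char) : ∀ (t p j : Int),
    List.foldl stepB (t, p, some c, j) (List.replicate k c) = (t, p, some c, j + k) := by
  induction k with
  | zero => intro t p j; simp
  | succ k ih =>
    intro t p j
    rw [List.replicate_succ, List.foldl_cons]
    rw [show stepB (t, p, some c, j) c = (t, p, some c, j + 1) from by simp [stepB]]
    rw [ih]
    push_cast; ring_nf

theorem bmach (rs : List (Char × Nat)) : ∀ (cur : Option Char) (jk t p : Int),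
    wfR cur rs →
    finB (List.foldl stepB (t, p, cur, jk) (flat rs)) =
      runB (flushB cur jk t p).1 (flushB cur jk t p).2 rs := by
  induction rs with
  | nil => intro cur jk t p _; simp [flat, finB, runB]
  | cons ck rs ih =>
    obtain ⟨c, k⟩ := ck
    intro cur jk t p hwf
    obtain ⟨hk, hne, hwf'⟩ := hwf
    obtain ⟨j, rfl⟩ : ∃ j, k = j + 1 := ⟨k - 1, by omega⟩
    rw [show flat ((c, j + 1) :: rs) = List.replicate (j+1) c ++ flat rs from rfl]
    rw [List.replicate_succ, List.cons_append, List.foldl_cons]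
    have hstep : stepB (t, p, cur, jk) c =
        ((flushB cur jk t p).1, (flushB cur jk t p).2, some c, 1) := by
      simp [stepB, hne]
    rw [hstep, List.foldl_append, repl_fold]
    rw [ih (some c) (1 + (j:Int)) (flushB cur jk t p).1 (flushB cur jk t p).2 hwf']
    have hcast : (1 : Int) + (j : Int) = (((j:Nat) + 1 : Nat) : Int) := by push_cast; ring
    rw [hcast]
    set T := (flushB cur jk t p).1 with hT
    set P := (flushB cur jk t p).2 with hP
    by_cases h1 : c = '<'
    · subst h1
      rw [show flushB (some '<') ((((j:Nat) + 1 : Nat)) : Int) T P =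
        (T + PySem.Int.floordiv (((((j:Nat) + 1 : Nat)) : Int) * ((((j:Nat) + 1 : Nat) : Int) + 1)) 2,
          (((j:Nat) + 1 : Nat) : Int)) from by simp [flushB]]
      rw [tri_flush]
      simp [runB]
    · by_cases h2 : c = '>'
      · subst h2
        rw [show flushB (some '>') ((((j:Nat) + 1 : Nat)) : Int) T P =
          (T + PySem.Int.floordiv (((((j:Nat) + 1 : Nat)) : Int) * ((((j:Nat) + 1 : Nat) : Int) + 1)) 2 - min P (((j:Nat) + 1 : Nat) : Int),
            0) from by simp [flushB]]
        rw [tri_flush]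
        simp [runB]
      · rw [show flushB (some c) ((((j:Nat) + 1 : Nat)) : Int) T P = (T, 0) from by
          simp [flushB, h1, h2]]
        simp [runB, h1, h2]

theorem solve_alt_eq (S : String) : solve_alt S = runB 0 0 (runsOf S.toList) := by
  have hwf : wfR none (runsOf S.toList) :=
    wf_runsOf S.toList none (by intro d _; simp)
  have h := bmach (runsOf S.toList) none 0 0 0 hwf
  rw [flat_runsOf] at h
  have hfl : flushB none 0 0 0 = (0, 0) := by simp [flushB]
  rw [hfl] at h
  exact h

-- ===== VERDICT (by name: the statement is the Claim_ definition above) =====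
theorem solve_spec : Claim_equal_solve := by
  intro S _
  unfold Spec_solve
  rw [solve_eq_mvals, solve_alt_eq]
  have h := key (runsOf S.toList) none 0
    (wf_runsOf S.toList none (by intro d _; simp)) le_rfl (by omega)
  rw [flat_runsOf] at h
  exact h
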